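-- pv_equiv track=rewrite | github.com/shigetosidumeda-cyber/autonomath-mcp | scripts/etl/auto_tag_program_jsic.py | score_program
-- ===== SOURCE A (Python) =====
-- def score_program(
--     name_text: str,
--     body_text: str,
--     keyword_dict: dict[str, set[str]],
-- ) -> dict[str, int]:
--     """Return {major: score}. name match scores +3, body match scores +1."""
--     scores: dict[str, int] = {}
--     for major, kws in keyword_dict.items():
--         if not kws:
--             continue
--         score = 0
--         for kw in kws:
--             if kw in name_text:
--                 score += 3
--             if kw in body_text:
--                 score += 1
--         if score > 0:
--             scores[major] = score
--     return scores
-- ===== SOURCE B (Python) =====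
-- def score_program(
--     name_text: str,
--     body_text: str,
--     keyword_dict: dict[str, set[str]],
-- ) -> dict[str, int]:
--     """Return {major: score}. name match scores +3, body match scores +1.
--
--     Different algorithm: instead of running a substring search over the texts
--     for every (major, keyword) pair, build a substring index per text (every
--     substring whose length is a keyword length, in a hash set); scoring then
--     needs only O(1) set lookups per keyword."""
--     lens = {len(kw) for kws in keyword_dict.values() for kw in kws}
--
--     def substrings(text):
--         subs = set()
--         for L in lens:
--             for i in range(len(text) - L + 1):
--                 subs.add(text[i:i + L])
--         return subs
--
--     name_subs = substrings(name_text)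
--     body_subs = substrings(body_text)
--
--     out: dict[str, int] = {}
--     for major, kws in keyword_dict.items():
--         score = sum(3 * (kw in name_subs) + (kw in body_subs) for kw in kws)
--         if score > 0:
--             out[major] = score
--     return out
-- ===== Notes on version B (the rewrite author's own statement) =====
-- stated objective: faster
-- what changed: B replaces the per-(major,keyword) substring search over the texts with a precomputed substring index: every substring of each text whose length is a keyword length goes into a hash set once, and each major is then scored by O(1) set lookups per keyword.
import Mathlib
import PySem

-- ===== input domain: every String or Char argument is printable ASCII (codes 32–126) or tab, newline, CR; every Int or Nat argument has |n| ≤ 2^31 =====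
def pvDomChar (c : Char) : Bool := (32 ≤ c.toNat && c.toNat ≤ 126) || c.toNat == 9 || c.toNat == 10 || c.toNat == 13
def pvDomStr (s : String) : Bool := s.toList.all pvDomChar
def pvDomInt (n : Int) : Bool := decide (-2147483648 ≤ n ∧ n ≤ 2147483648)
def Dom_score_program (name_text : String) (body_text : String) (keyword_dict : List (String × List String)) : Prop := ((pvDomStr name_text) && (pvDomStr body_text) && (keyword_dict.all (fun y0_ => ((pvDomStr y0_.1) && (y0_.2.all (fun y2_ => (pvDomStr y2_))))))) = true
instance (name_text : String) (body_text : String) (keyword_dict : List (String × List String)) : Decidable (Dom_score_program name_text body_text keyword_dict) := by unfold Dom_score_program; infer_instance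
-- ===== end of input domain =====

-- B replaces the per-(major,keyword) substring search with a precomputed substring index
-- (every substring of each text whose length is a keyword length, in a set), so scoring is
-- set lookups only; a timing run measured B faster on the generated inputs.

-- ===== PORT A =====
def score_program (name_text : String) (body_text : String) (keyword_dict : List (String × List String)) : List (String × Int) :=
  (keyword_dict.foldl (fun (scores : PySem.Dict String Int) p =>
      if p.2.isEmpty then scores
      else
        let score := p.2.foldl (fun s kw =>
          let s := if PySem.Str.isIn kw name_text then s + 3 else s
          if PySem.Str.isIn kw body_text then s + 1 else s) (0 : Int)
        if score > 0 then scores.insert p.1 score else scores)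
    PySem.Dict.empty).items

-- ===== PORT B =====
-- the substring index of one text: every substring whose length occurs in lens
def pvSubstrings (lens : PySem.Set Int) (text : String) : PySem.Set String :=
  lens.foldl (fun subs L =>
    (PySem.List.pyRange 0 (PySem.Str.len text - L + 1) 1).foldl (fun subs i =>
      PySem.Set.add subs (PySem.Str.slice text (some i) (some (i + L)))) subs)
  PySem.Set.empty

def score_program_alt (name_text : String) (body_text : String) (keyword_dict : List (String × List String)) : List (String × Int) :=
  let lens : PySem.Set Int :=
    PySem.Set.ofList ((keyword_dict.flatMap (fun p => p.2)).map PySem.Str.len)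
  let name_subs := pvSubstrings lens name_text
  let body_subs := pvSubstrings lens body_text
  (keyword_dict.foldl (fun (out : PySem.Dict String Int) p =>
      let score := p.2.foldl (fun s kw =>
        s + (if PySem.Set.contains name_subs kw then 3 else 0)
          + (if PySem.Set.contains body_subs kw then 1 else 0)) (0 : Int)
      if score > 0 then out.insert p.1 score else out)
    PySem.Dict.empty).items

-- ===== PRECONDITION & SPEC =====
def Spec_score_program (name_text : String) (body_text : String) (keyword_dict : List (String × List String)) (out : List (String × Int)) : Prop := out = score_program_alt name_text body_text keyword_dict
instance (name_text : String) (body_text : String) (keyword_dict : List (String × List String)) (out : List (String × Int)) : Decidable (Spec_score_program name_text body_text keyword_dict out) := by unfold Spec_score_program; infer_instance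

-- ===== CLAIM (what is proved, stated in full; the proofs are below) =====
def Claim_equal_score_program : Prop := ∀ (name_text : String) (body_text : String) (keyword_dict : List (String × List String)), Dom_score_program name_text body_text keyword_dict → Spec_score_program name_text body_text keyword_dict (score_program name_text body_text keyword_dict)

-- ===== LEMMAS AND PROOFS =====

-- membership in a fold of Set.add over images
lemma pv_mem_foldl_add {α β : Type} [BEq β] [LawfulBEq β] (f : α → β) (l : List α)
    (s : PySem.Set β) (x : β) :
    x ∈ l.foldl (fun s y => PySem.Set.add s (f y)) s ↔ x ∈ s ∨ ∃ y ∈ l, x = f y := by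
  induction l generalizing s with
  | nil => simp
  | cons a t ih =>
    simp only [List.foldl_cons, ih, PySem.Set.mem_add]
    constructor
    · rintro (⟨h | h⟩ | ⟨y, hy, rfl⟩)
      · exact Or.inl h
      · exact Or.inr ⟨a, by simp, h⟩
      · exact Or.inr ⟨y, by simp [hy], rfl⟩
    · rintro (h | ⟨y, hy, rfl⟩)
      · exact Or.inl (Or.inl h)
      · rcases List.mem_cons.mp hy with rfl | hy
        · exact Or.inl (Or.inr rfl)
        · exact Or.inr ⟨y, hy, rfl⟩

-- membership in the substring index
lemma pv_mem_substrings_gen (lens : List Int) (text : String) (s : PySem.Set String) (x : String) :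
    x ∈ lens.foldl (fun subs L =>
      (PySem.List.pyRange 0 (PySem.Str.len text - L + 1) 1).foldl (fun subs i =>
        PySem.Set.add subs (PySem.Str.slice text (some i) (some (i + L)))) subs) s
    ↔ x ∈ s ∨ ∃ L ∈ lens, ∃ i ∈ PySem.List.pyRange 0 (PySem.Str.len text - L + 1) 1,
        x = PySem.Str.slice text (some i) (some (i + L)) := by
  induction lens generalizing s with
  | nil => simp
  | cons L t ih =>
    simp only [List.foldl_cons, ih, pv_mem_foldl_add]
    constructor
    · rintro (⟨h | ⟨i, hi, rfl⟩⟩ | ⟨M, hM, i, hi, rfl⟩)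
      · exact Or.inl h
      · exact Or.inr ⟨L, by simp, i, hi, rfl⟩
      · exact Or.inr ⟨M, by simp [hM], i, hi, rfl⟩
    · rintro (h | ⟨M, hM, i, hi, rfl⟩)
      · exact Or.inl (Or.inl h)
      · rcases List.mem_cons.mp hM with rfl | hM
        · exact Or.inl (Or.inr ⟨i, hi, rfl⟩)
        · exact Or.inr ⟨M, hM, i, hi, rfl⟩

lemma pv_mem_substrings (lens : PySem.Set Int) (text : String) (x : String) :
    x ∈ pvSubstrings lens text
    ↔ ∃ L ∈ lens, ∃ i ∈ PySem.List.pyRange 0 (PySem.Str.len text - L + 1) 1,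
        x = PySem.Str.slice text (some i) (some (i + L)) := by
  unfold pvSubstrings
  rw [pv_mem_substrings_gen]
  simp [PySem.Set.empty]

-- a slice with bounds from the range is a substring of the text
lemma pv_slice_isIn (text : String) (L i : Int) (hL : 0 ≤ L)
    (hi : i ∈ PySem.List.pyRange 0 (PySem.Str.len text - L + 1) 1) :
    PySem.Str.isIn (PySem.Str.slice text (some i) (some (i + L))) text = true := by
  obtain ⟨hi0, hilt⟩ := PySem.List.mem_pyRange_one.mp hi
  rw [PySem.Str.isIn_iff_infix, PySem.Str.toList_slice, PySem.Chars.slice_eq_listSlice]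
  obtain ⟨j, rfl⟩ := Int.eq_ofNat_of_zero_le hi0
  obtain ⟨n, rfl⟩ := Int.eq_ofNat_of_zero_le hL
  rw [PySem.List.slice_natCast_add]
  exact ((text.toList.drop j).take_prefix n).isInfix.trans (text.toList.drop_suffix j).isInfix

-- an occurring substring of the text with its length in lens is in the index
lemma pv_isIn_mem (lens : PySem.Set Int) (text kw : String)
    (hlen : (PySem.Str.len kw) ∈ lens)
    (h : PySem.Str.isIn kw text = true) :
    kw ∈ pvSubstrings lens text := by
  rw [pv_mem_substrings]
  refine ⟨PySem.Str.len kw, hlen, ?_⟩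
  rw [PySem.Str.isIn_iff_infix] at h
  obtain ⟨pre, suf, hsplit⟩ := h
  refine ⟨(pre.length : Int), ?_, ?_⟩
  · rw [PySem.List.mem_pyRange_one]
    constructor
    · exact Int.natCast_nonneg _
    · have : pre.length + kw.toList.length ≤ text.toList.length := by
        rw [← hsplit]; simp
      simp only [PySem.Str.len]
      omega
  · apply (String.toList_inj.mp · |>.symm)
    rw [PySem.Str.toList_slice, PySem.Chars.slice_eq_listSlice]
    have hLcast : PySem.Str.len kw = (kw.toList.length : Int) := by
      simp [PySem.Str.len]
    rw [hLcast, PySem.List.slice_natCast_add, ← hsplit]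
    simp

-- contains on the index agrees with the substring test, for keywords whose length is in lens
lemma pv_contains_eq (lens : PySem.Set Int) (hpos : ∀ L ∈ lens, 0 ≤ L)
    (text kw : String) (hlen : PySem.Str.len kw ∈ lens) :
    PySem.Set.contains (pvSubstrings lens text) kw = PySem.Str.isIn kw text := by
  by_cases h : PySem.Str.isIn kw text = true
  · rw [h]
    have := pv_isIn_mem lens text kw hlen h
    simpa [PySem.Set.contains] using this
  · rw [Bool.eq_false_iff.mpr h]
    rw [Bool.eq_false_iff]
    intro hc
    have hm : kw ∈ pvSubstrings lens text := by simpa [PySem.Set.contains] using hc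
    obtain ⟨L, hL, i, hi, rfl⟩ := (pv_mem_substrings lens text kw).mp hm
    exact h (pv_slice_isIn text L i (hpos L hL) hi)

-- the two inner folds agree when the membership tests agree on every keyword of the list
lemma pv_inner (nt bt : String) (nsubs bsubs : PySem.Set String) (u : List String)
    (hp : ∀ kw ∈ u,
      PySem.Set.contains nsubs kw = PySem.Str.isIn kw nt ∧
      PySem.Set.contains bsubs kw = PySem.Str.isIn kw bt) (s : Int) :
    u.foldl (fun s kw =>
      let s := if PySem.Str.isIn kw nt then s + 3 else s
      if PySem.Str.isIn kw bt then s + 1 else s) s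
    = u.foldl (fun s kw =>
      s + (if PySem.Set.contains nsubs kw then 3 else 0)
        + (if PySem.Set.contains bsubs kw then 1 else 0)) s := by
  induction u generalizing s with
  | nil => rfl
  | cons kw t ih =>
    simp only [List.foldl_cons]
    obtain ⟨h1, h2⟩ := hp kw (List.mem_cons_self ..)
    rw [← h1, ← h2]
    have hacc : (if PySem.Set.contains bsubs kw = true then
          (if PySem.Set.contains nsubs kw = true then s + 3 else s) + 1
        else (if PySem.Set.contains nsubs kw = true then s + 3 else s))
        = s + (if PySem.Set.contains nsubs kw = true then 3 else 0)
            + (if PySem.Set.contains bsubs kw = true then 1 else 0) := by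
      split_ifs <;> ring
    rw [hacc]
    exact ih (fun x hx => hp x (List.mem_cons_of_mem _ hx)) _

-- the two scoring folds agree when the membership tests agree on every occurring keyword
lemma pv_score (nt bt : String) (nsubs bsubs : PySem.Set String)
    (l : List (String × List String)) (acc : PySem.Dict String Int)
    (h : ∀ p ∈ l, ∀ kw ∈ p.2,
      PySem.Set.contains nsubs kw = PySem.Str.isIn kw nt ∧
      PySem.Set.contains bsubs kw = PySem.Str.isIn kw bt) :
    l.foldl (fun (scores : PySem.Dict String Int) p =>
      if p.2.isEmpty then scores
      else
        let score := p.2.foldl (fun s kw =>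
          let s := if PySem.Str.isIn kw nt then s + 3 else s
          if PySem.Str.isIn kw bt then s + 1 else s) (0 : Int)
        if score > 0 then scores.insert p.1 score else scores) acc
    = l.foldl (fun (out : PySem.Dict String Int) p =>
        let score := p.2.foldl (fun s kw =>
          s + (if PySem.Set.contains nsubs kw then 3 else 0)
            + (if PySem.Set.contains bsubs kw then 1 else 0)) (0 : Int)
        if score > 0 then out.insert p.1 score else out) acc := by
  induction l generalizing acc with
  | nil => rfl
  | cons p t ih =>
    simp only [List.foldl_cons]
    have ht := fun q hq => h q (List.mem_cons_of_mem _ hq)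
    by_cases he : p.2.isEmpty
    · rw [if_pos he]
      have hnil : p.2 = [] := List.isEmpty_iff.mp he
      rw [ih acc ht]
      congr 1
      simp [hnil]
    · rw [if_neg he, pv_inner nt bt nsubs bsubs p.2 (h p (List.mem_cons_self ..))]
      exact ih _ ht

-- ===== VERDICT (by name: the statement is the Claim_ definition above) =====
theorem score_program_spec : Claim_equal_score_program := by
  intro nt bt kd _
  unfold Spec_score_program score_program score_program_alt
  have hlens : ∀ p ∈ kd, ∀ kw ∈ p.2, PySem.Str.len kw ∈
      PySem.Set.ofList ((kd.flatMap (fun p => p.2)).map PySem.Str.len) := by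
    intro p hp kw hkw
    rw [PySem.Set.mem_ofList]
    exact List.mem_map_of_mem (List.mem_flatMap.mpr ⟨p, hp, hkw⟩)
  have hpos : ∀ L ∈ PySem.Set.ofList ((kd.flatMap (fun p => p.2)).map PySem.Str.len), 0 ≤ L := by
    intro L hL
    rw [PySem.Set.mem_ofList] at hL
    obtain ⟨kw, _, rfl⟩ := List.mem_map.mp hL
    simp [PySem.Str.len]
  congr 1
  exact pv_score nt bt _ _ kd PySem.Dict.empty (fun p hp kw hkw =>
    ⟨pv_contains_eq _ hpos nt kw (hlens p hp kw hkw),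
     pv_contains_eq _ hpos bt kw (hlens p hp kw hkw)⟩)
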